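-- pv_equiv track=rewrite | github.com/Curiosity-Machines/inatVisionTraining | build_taxonomy_csv.py | build_taxon_id_to_path
-- ===== SOURCE A (Python) =====
-- def build_taxon_id_to_path(paths):
--     """
--     Builds a mapping from taxon_id to its full path for sorting purposes.
--     """
--     taxon_to_path = {}
--     for path in paths:
--         for i, tid in enumerate(path):
--             current_path = path[:i+1]
--             if tid not in taxon_to_path or len(current_path) > len(taxon_to_path[tid]):
--                 taxon_to_path[tid] = current_path
--     return taxon_to_path
-- ===== SOURCE B (Python) =====
-- def build_taxon_id_to_path(paths):
--     """
--     Builds a mapping from taxon_id to its full path for sorting purposes.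
--     """
--     # Stage 1: index every occurrence of each taxon as (path, position).
--     occ = {}
--     for path in paths:
--         for i, tid in enumerate(path):
--             occ.setdefault(tid, []).append((path, i))
--     # Stage 2: per taxon, take the deepest occurrence (first on ties) and
--     # slice its prefix once.
--     result = {}
--     for tid, lst in occ.items():
--         p, i = max(lst, key=lambda t: t[1])
--         result[tid] = p[:i + 1]
--     return result
-- ===== Notes on version B (the rewrite author's own statement) =====
-- stated objective: faster
-- what changed: B replaces A's streaming best-prefix dict (which slices a prefix at every node) by a two-stage group-by: it first builds an index of all (path, position) occurrences per taxon, then selects each taxon's deepest occurrence with max(key=...) and slices exactly one prefix per taxon.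
import Mathlib
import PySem

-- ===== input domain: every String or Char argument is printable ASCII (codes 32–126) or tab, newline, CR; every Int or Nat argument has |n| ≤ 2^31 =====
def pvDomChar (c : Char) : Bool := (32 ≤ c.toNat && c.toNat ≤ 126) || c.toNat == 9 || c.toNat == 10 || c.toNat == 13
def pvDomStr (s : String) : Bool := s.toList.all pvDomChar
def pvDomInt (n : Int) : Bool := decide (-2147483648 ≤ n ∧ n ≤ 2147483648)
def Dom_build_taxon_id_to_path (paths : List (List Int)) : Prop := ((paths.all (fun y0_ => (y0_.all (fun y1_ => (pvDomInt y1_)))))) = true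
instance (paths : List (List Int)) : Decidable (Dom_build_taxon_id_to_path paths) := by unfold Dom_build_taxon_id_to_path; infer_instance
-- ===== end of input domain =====

-- B builds an index of all (path, position) occurrences per taxon first, then takes each
-- taxon's deepest occurrence and slices one prefix per taxon (faster: asymptotic).


-- ===== PORT A =====
-- inner-loop body of A: current_path = path[:i+1]; conditional overwrite with the slice
def pvStepA (path : List Int) (d : PySem.Dict Int (List Int)) (p : Int × Int) :
    PySem.Dict Int (List Int) :=
  let current_path := PySem.List.slice path none (some (p.1 + 1))
  if (!d.contains p.2) || decide ((d.getD p.2 []).length < current_path.length) then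
    d.insert p.2 current_path
  else d

def build_taxon_id_to_path (paths : List (List Int)) : List (Int × List Int) :=
  (paths.foldl
    (fun d path => (PySem.List.enumerate path).foldl (pvStepA path) d)
    PySem.Dict.empty).items

-- ===== PORT B =====
-- occ.setdefault(tid, []).append((path, i)): read the current list (default []) and
-- store the extended list back under the same key (Dict.insert overwrites in place)
def pvAddOcc (path : List Int) (e : PySem.Dict Int (List (List Int × Int))) (p : Int × Int) :
    PySem.Dict Int (List (List Int × Int)) :=
  e.insert p.2 (e.getD p.2 [] ++ [(path, p.1)])

def build_taxon_id_to_path_alt (paths : List (List Int)) : List (Int × List Int) :=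
  -- Stage 1: index every occurrence of each taxon as (path, position)
  let occ := paths.foldl
    (fun e path => (PySem.List.enumerate path).foldl (pvAddOcc path) e)
    PySem.Dict.empty
  -- Stage 2: p, i = max(lst, key=lambda t: t[1]); result[tid] = p[:i+1]
  -- (the none branch is a totality guard only: every stored list is nonempty)
  (occ.items.foldl
    (fun d q =>
      match PySem.List.max? q.2 (fun t => t.2) with
      | some t => d.insert q.1 (PySem.List.slice t.1 none (some (t.2 + 1)))
      | none => d)
    PySem.Dict.empty).items

-- ===== PRECONDITION & SPEC =====
def Spec_build_taxon_id_to_path (paths : List (List Int)) (out : List (Int × List Int)) : Prop := out = build_taxon_id_to_path_alt paths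
instance (paths : List (List Int)) (out : List (Int × List Int)) : Decidable (Spec_build_taxon_id_to_path paths out) := by unfold Spec_build_taxon_id_to_path; infer_instance

-- ===== CLAIM =====
def Claim_equal_build_taxon_id_to_path : Prop := ∀ (paths : List (List Int)), Dom_build_taxon_id_to_path paths → Spec_build_taxon_id_to_path paths (build_taxon_id_to_path paths)

-- ===== LEMMAS AND PROOFS =====

-- the value stage 2 extracts from one stored occurrence list
def pvVal (lst : List (List Int × Int)) : List Int :=
  match PySem.List.max? lst (fun t => t.2) with
  | some t => PySem.List.slice t.1 none (some (t.2 + 1))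
  | none => []

def pvMat (q : Int × List (List Int × Int)) : Int × List Int := (q.1, pvVal q.2)

-- invariant relating A's dict to B's occurrence index
def pvRel (d : PySem.Dict Int (List Int)) (e : PySem.Dict Int (List (List Int × Int))) : Prop :=
  d.items = e.items.map pvMat ∧
  (∀ q ∈ e.items, q.2 ≠ [] ∧ ∀ t ∈ q.2, 0 ≤ t.2 ∧ t.2 < (t.1.length : Int)) ∧
  e.keys.Nodup

theorem pvRel_keys {d : PySem.Dict Int (List Int)} {e : PySem.Dict Int (List (List Int × Int))}
    (h : pvRel d e) : d.keys = e.keys := by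
  have h1 := h.1
  show d.items.map (·.1) = e.items.map (·.1)
  rw [h1, List.map_map]
  rfl

theorem pvVal_append (lst : List (List Int × Int)) (t0 x : List Int × Int)
    (hm : PySem.List.max? lst (fun t => t.2) = some t0) :
    pvVal (lst ++ [x]) = if t0.2 < x.2 then PySem.List.slice x.1 none (some (x.2 + 1))
                         else pvVal lst := by
  have hnew : PySem.List.max? (lst ++ [x]) (fun t => t.2) =
      if t0.2 < x.2 then some x else some t0 := by
    unfold PySem.List.max? at hm ⊢
    rw [List.foldl_append, hm]
    by_cases hg : t0.2 < x.2 <;> simp [List.foldl, hg]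
  unfold pvVal
  rw [hnew, hm]
  by_cases hg : t0.2 < x.2 <;> simp [hg]

theorem pvVal_eq_of_mem {e : PySem.Dict Int (List (List Int × Int))}
    (hnd : e.keys.Nodup) {tid : Int} {lst : List (List Int × Int)}
    (hq : (tid, lst) ∈ e.items) (q : Int × List (List Int × Int))
    (hq' : q ∈ e.items) (h1 : q.1 = tid) : q.2 = lst := by
  have ha : e.getD tid [] = lst := PySem.Dict.getD_of_mem_items e hq hnd []
  have hb : e.getD q.1 [] = q.2 := PySem.Dict.getD_of_mem_items e hq' hnd []
  rw [h1, ha] at hb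
  exact hb.symm

theorem pvRel_step {d : PySem.Dict Int (List Int)} {e : PySem.Dict Int (List (List Int × Int))}
    (path : List Int) (k : Nat) (hk : k < path.length) (tid : Int)
    (h : pvRel d e) : pvRel (pvStepA path d ((k : Int), tid)) (pvAddOcc path e ((k : Int), tid)) := by
  obtain ⟨hmap, hbnd, hnd⟩ := h
  have hdnd : d.keys.Nodup := by rw [pvRel_keys ⟨hmap, hbnd, hnd⟩]; exact hnd
  have hkeys : d.keys = e.keys := pvRel_keys ⟨hmap, hbnd, hnd⟩
  have hcont : d.contains tid = e.contains tid := by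
    rw [PySem.Dict.contains_eq_decide_mem_keys, PySem.Dict.contains_eq_decide_mem_keys, hkeys]
  have hcurlen : (PySem.List.slice path none (some ((k : Int) + 1))).length = k + 1 := by
    have : ((k : Int) + 1) = ((k + 1 : Nat) : Int) := by push_cast; ring
    rw [this, PySem.List.slice_to_natCast, List.length_take]
    omega
  by_cases hc : e.contains tid = true
  · -- tid already indexed
    have hmemk : tid ∈ e.keys := by
      rw [PySem.Dict.contains_eq_decide_mem_keys] at hc
      exact of_decide_eq_true hc
    obtain ⟨q0, hq0, hq01⟩ := List.mem_map.1 (show tid ∈ e.items.map (·.1) from hmemk)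
    obtain ⟨qk, lst⟩ := q0
    rw [show qk = tid from hq01] at hq0
    have hlst := hbnd _ hq0
    have hmne : PySem.List.max? lst (fun t => t.2) ≠ none :=
      fun hcon => hlst.1 ((PySem.List.max?_eq_none_iff _ _).1 hcon)
    obtain ⟨t0, hm⟩ := Option.ne_none_iff_exists'.1 hmne
    have ht0mem : t0 ∈ lst := PySem.List.max?_mem hm
    have ht0b := hlst.2 t0 ht0mem
    have hEgetD : e.getD tid [] = lst := PySem.Dict.getD_of_mem_items e hq0 hnd []
    have hpv : pvVal lst = PySem.List.slice t0.1 none (some (t0.2 + 1)) := by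
      unfold pvVal; rw [hm]
    have hDmem : (tid, pvVal lst) ∈ d.items := by
      rw [hmap]; exact List.mem_map.2 ⟨(tid, lst), hq0, rfl⟩
    have hDgetD : d.getD tid [] = pvVal lst :=
      PySem.Dict.getD_of_mem_items d hDmem hdnd []
    have hslen : (pvVal lst).length = t0.2.toNat + 1 := by
      rw [hpv]
      have h1 : (0:Int) ≤ t0.2 + 1 := by omega
      rw [PySem.List.slice_to t0.1 h1, List.length_take]
      omega
    have hcd : d.contains tid = true := by rw [hcont]; exact hc
    -- A's guard is exactly t0.2 < k
    have hguard : ((!d.contains tid) ||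
        decide ((d.getD tid []).length < (PySem.List.slice path none (some ((k : Int) + 1))).length))
        = decide (t0.2 < (k : Int)) := by
      rw [hcd, hDgetD, hslen, hcurlen]
      simp only [Bool.not_true, Bool.false_or]
      have : (t0.2.toNat + 1 < k + 1) ↔ (t0.2 < (k : Int)) := by omega
      simp [this]
    have hpvnew : pvVal (lst ++ [(path, (k : Int))]) =
        if t0.2 < (k : Int) then PySem.List.slice path none (some ((k : Int) + 1)) else pvVal lst :=
      pvVal_append lst t0 (path, (k : Int)) hm
    unfold pvStepA pvAddOcc
    simp only []
    rw [hguard, hEgetD]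
    refine ⟨?_, ?_, ?_⟩
    · -- items equality
      by_cases hg : t0.2 < (k : Int)
      · simp only [decide_eq_true hg, if_true]
        rw [PySem.Dict.items_insert_of_contains d _ hcd,
            PySem.Dict.items_insert_of_contains e _ hc, hmap, List.map_map, List.map_map]
        apply List.map_congr_left
        intro q hq
        by_cases h1 : q.1 = tid
        · have h2 : q.2 = lst := pvVal_eq_of_mem hnd hq0 q hq h1
          simp [Function.comp, pvMat, h1, h2, hpvnew, hg]
        · simp [Function.comp, pvMat, h1]
      · simp only [decide_eq_false hg, Bool.false_eq_true, if_false]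
        rw [PySem.Dict.items_insert_of_contains e _ hc, hmap, List.map_map]
        apply List.map_congr_left
        intro q hq
        by_cases h1 : q.1 = tid
        · have h2 : q.2 = lst := pvVal_eq_of_mem hnd hq0 q hq h1
          rw [show q = (tid, lst) from Prod.ext h1 h2]
          simp [Function.comp, pvMat, hpvnew, hg]
        · simp [Function.comp, pvMat, h1]
    · -- bounds
      intro q hq
      rcases (PySem.Dict.mem_items_insert _ _ _ _).1 hq with h1 | h1
      · subst h1
        refine ⟨by simp, ?_⟩
        intro t ht
        rcases List.mem_append.1 ht with h2 | h2
        · exact hlst.2 t h2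
        · rw [List.mem_singleton.1 h2]
          exact ⟨Int.natCast_nonneg k,
            show ((k : Int)) < ((path.length : Nat) : Int) by exact_mod_cast hk⟩
      · exact hbnd _ h1.1
    · rw [PySem.Dict.keys_insert_of_contains e _ hc]; exact hnd
  · -- fresh tid
    have hc' : e.contains tid = false := by simpa using hc
    have hcd : d.contains tid = false := by rw [hcont]; exact hc'
    have hEgetD : e.getD tid [] = [] := PySem.Dict.getD_of_not_contains e [] hc'
    unfold pvStepA pvAddOcc
    simp only []
    rw [hcd, hEgetD]
    simp only [Bool.not_false, Bool.true_or, if_true, List.nil_append]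
    refine ⟨?_, ?_, ?_⟩
    · rw [PySem.Dict.items_insert_of_not_contains d _ hcd,
          PySem.Dict.items_insert_of_not_contains e _ hc', hmap, List.map_append]
      have : pvVal [(path, (k : Int))] = PySem.List.slice path none (some ((k : Int) + 1)) := by
        unfold pvVal PySem.List.max?
        simp [List.foldl]
      simp [pvMat, this]
    · intro q hq
      rcases (PySem.Dict.mem_items_insert _ _ _ _).1 hq with h1 | h1
      · subst h1
        refine ⟨by simp, ?_⟩
        intro t ht
        rw [List.mem_singleton.1 ht]
        exact ⟨Int.natCast_nonneg k,
          show ((k : Int)) < ((path.length : Nat) : Int) by exact_mod_cast hk⟩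
      · exact hbnd _ h1.1
    · rw [PySem.Dict.keys_insert_of_not_contains e _ hc']
      refine List.Nodup.append hnd (List.nodup_singleton _) ?_
      intro a ha hb
      have haa : a = tid := List.mem_singleton.1 hb
      subst haa
      rw [PySem.Dict.contains_eq_decide_mem_keys] at hc'
      exact absurd ha (of_decide_eq_false hc')

theorem pvRel_inner (path : List Int) (l : List (Int × Int))
    (hl : ∀ p ∈ l, ∃ k : Nat, k < path.length ∧ p.1 = (k : Int)) :
    ∀ d e, pvRel d e → pvRel (l.foldl (pvStepA path) d) (l.foldl (pvAddOcc path) e) := by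
  induction l with
  | nil => intro d e h; exact h
  | cons p t ih =>
    intro d e h
    obtain ⟨k, hk, hp1⟩ := hl p (List.mem_cons_self ..)
    have hstep : pvRel (pvStepA path d p) (pvAddOcc path e p) := by
      have : p = ((k : Int), p.2) := by rw [← hp1]
      rw [this]
      exact pvRel_step path k hk p.2 h
    exact ih (fun q hq => hl q (List.mem_cons_of_mem _ hq)) _ _ hstep

theorem pvRel_outer (paths : List (List Int)) :
    ∀ d e, pvRel d e →
      pvRel (paths.foldl (fun d path => (PySem.List.enumerate path).foldl (pvStepA path) d) d)
            (paths.foldl (fun e path => (PySem.List.enumerate path).foldl (pvAddOcc path) e) e) := by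
  induction paths with
  | nil => intro d e h; exact h
  | cons path t ih =>
    intro d e h
    refine ih _ _ (pvRel_inner path _ ?_ d e h)
    intro p hp
    obtain ⟨k, hk, hpk⟩ := (PySem.List.mem_enumerate_iff _ _ _).1 hp
    exact ⟨k, hk, by rw [hpk]; simp⟩

-- stage 2's fold is a fold of fresh inserts once every stored list is nonempty
theorem pvStage2_eq (l : List (Int × List (List Int × Int)))
    (hne : ∀ q ∈ l, q.2 ≠ []) (d : PySem.Dict Int (List Int)) :
    l.foldl (fun d q =>
      match PySem.List.max? q.2 (fun t => t.2) with
      | some t => d.insert q.1 (PySem.List.slice t.1 none (some (t.2 + 1)))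
      | none => d) d
    = l.foldl (fun d q => d.insert q.1 (pvVal q.2)) d := by
  induction l generalizing d with
  | nil => rfl
  | cons q t ih =>
    have hmne : PySem.List.max? q.2 (fun t => t.2) ≠ none :=
      fun hcon => hne q (List.mem_cons_self ..) ((PySem.List.max?_eq_none_iff _ _).1 hcon)
    obtain ⟨t0, hm⟩ := Option.ne_none_iff_exists'.1 hmne
    simp only [List.foldl_cons, hm]
    rw [show pvVal q.2 = PySem.List.slice t0.1 none (some (t0.2 + 1)) by unfold pvVal; rw [hm]]
    exact ih (fun q hq => hne q (List.mem_cons_of_mem _ hq)) _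

-- ===== VERDICT =====
theorem build_taxon_id_to_path_spec : Claim_equal_build_taxon_id_to_path := by
  intro paths _
  show build_taxon_id_to_path paths = build_taxon_id_to_path_alt paths
  unfold build_taxon_id_to_path build_taxon_id_to_path_alt
  have hrel := pvRel_outer paths PySem.Dict.empty PySem.Dict.empty
    ⟨by rfl, by intro q hq; simp [PySem.Dict.empty] at hq, by simp⟩
  set e := paths.foldl (fun e path => (PySem.List.enumerate path).foldl (pvAddOcc path) e)
    PySem.Dict.empty with he
  obtain ⟨hmap, hbnd, hnd⟩ := hrel
  rw [hmap]
  show List.map pvMat e.items =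
    (e.items.foldl (fun d q =>
      match PySem.List.max? q.2 (fun t => t.2) with
      | some t => d.insert q.1 (PySem.List.slice t.1 none (some (t.2 + 1)))
      | none => d) PySem.Dict.empty).items
  rw [pvStage2_eq e.items (fun q hq => (hbnd q hq).1)]
  rw [PySem.Dict.items_foldl_insert_fresh e.items (fun q => q.1) (fun q => pvVal q.2)
    PySem.Dict.empty (by intro a _; simp [PySem.Dict.contains_empty]) (by exact hnd)]
  rfl
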